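-- pv_equiv track=rewrite | github.com/JIEUNJJING/Programmers_Python | 프로그래머스/0/120815. 피자 나눠 먹기 （2）/피자 나눠 먹기 （2）.py | solution
-- ===== SOURCE A (Python) =====
-- def solution(n):
--     answer = 0
--     p = 0 # 피자 조각수 카운트
--     r = 1 # 사람수 * 피자조각수를 피자 한판갯수로 나눈 나머지
--     while r != 0: # r이 0이 되면 반복문 종료
--         p += 1
--         r = (n * p) % 6
--
--     answer = (n * p) // 6
--     return answer
-- ===== SOURCE B (Python) =====
-- import math
--
-- def solution(n):
--     return n // math.gcd(n, 6)
-- ===== Notes on version B (the rewrite author's own statement) =====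
-- stated objective: simpler
-- what changed: Replaces the trial loop over slice counts p with the closed form n // gcd(n, 6), with no loop.
import Mathlib
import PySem

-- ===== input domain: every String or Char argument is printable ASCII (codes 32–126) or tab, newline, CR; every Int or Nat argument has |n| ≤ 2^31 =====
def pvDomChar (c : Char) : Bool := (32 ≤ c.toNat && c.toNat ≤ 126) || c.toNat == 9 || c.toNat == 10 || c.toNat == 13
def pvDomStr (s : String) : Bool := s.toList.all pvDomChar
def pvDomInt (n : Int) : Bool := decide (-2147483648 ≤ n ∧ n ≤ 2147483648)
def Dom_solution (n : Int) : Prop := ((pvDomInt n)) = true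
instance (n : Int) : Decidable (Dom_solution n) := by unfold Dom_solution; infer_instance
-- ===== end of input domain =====

-- B replaces A's trial loop over slice counts with the closed form n // gcd(n, 6): simpler, no loop.
-- ===== PORT A =====
-- the while loop always terminates within 6 iterations (p = 6 gives (n*6) % 6 = 0); fuel 6 only makes that explicit
def solutionLoop (n : Int) : Nat → Int → Int
  | 0, p => p
  | k+1, p =>
      let p' := p + 1
      let r := PySem.Int.mod (n * p') 6
      if r ≠ 0 then solutionLoop n k p' else p'

def solution (n : Int) : Int :=
  let p := solutionLoop n 6 0
  PySem.Int.floordiv (n * p) 6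

-- ===== PORT B =====
def solution_alt (n : Int) : Int :=
  PySem.Int.floordiv n ((Int.gcd n 6 : Nat) : Int)

-- ===== PRECONDITION & SPEC =====
def Spec_solution (n : Int) (out : Int) : Prop := out = solution_alt n
instance (n : Int) (out : Int) : Decidable (Spec_solution n out) := by unfold Spec_solution; infer_instance

-- ===== CLAIM (what is proved, stated in full; the proofs are below) =====
def Claim_equal_solution : Prop := ∀ (n : Int), Dom_solution n → Spec_solution n (solution n)

-- ===== LEMMAS AND PROOFS =====

theorem solution_eq (n : Int) : solution n = solution_alt n := by
  have hm : ∀ a : Int, PySem.Int.mod a 6 = a % 6 :=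
    fun a => PySem.Int.mod_eq_emod_of_pos (by norm_num)
  have hg : ((Int.gcd n 6 : Nat) : Int) = ((Int.gcd (n % 6) 6 : Nat) : Int) := by
    rw [Int.gcd_emod]
  have hr : n % 6 = 0 ∨ n % 6 = 1 ∨ n % 6 = 2 ∨ n % 6 = 3 ∨ n % 6 = 4 ∨ n % 6 = 5 := by
    omega
  rcases hr with h|h|h|h|h|h <;>
    simp only [solution, solution_alt, solutionLoop, hm, hg, h] <;>
    norm_num [Int.gcd, PySem.Int.floordiv_eq_ediv_of_pos (by norm_num : (0:Int) < 6),
      PySem.Int.floordiv_eq_ediv_of_pos (by norm_num : (0:Int) < 3),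
      PySem.Int.floordiv_eq_ediv_of_pos (by norm_num : (0:Int) < 2),
      PySem.Int.floordiv_eq_ediv_of_pos (by norm_num : (0:Int) < 1)] <;>
    split_ifs <;> omega

-- ===== VERDICT =====
theorem solution_spec : Claim_equal_solution := by
  intro n _
  unfold Spec_solution
  exact solution_eq n
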